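-- pv_equiv track=rewrite | github.com/marellanoc/USM-TEL341-RIFECO-project | proyecto_simula.py | get_clockwise_routes
-- ===== SOURCE A (Python) =====
-- def get_clockwise_routes(i, j, n):
--     clockwise_routes_list = []
--     k = i
--     overclock = False
--
--     if (i < j):
--         while (k < j):
--             clockwise_routes_list.append(k)
--             k += 1
--
--     else:
--         while (k < j or not overclock):
--             clockwise_routes_list.append(k)
--             k += 1
--             if k > n - 1:
--                 k = 0
--                 overclock = True
--
--     return clockwise_routes_list
-- ===== SOURCE B (Python) =====
-- def _upto(a, b):
--     # indices a..b-1, generated DESCENDING from the upper endpoint, then reversed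
--     out = []
--     k = b
--     while k > a:
--         k -= 1
--         out.append(k)
--     out.reverse()
--     return out
--
-- def get_clockwise_routes(i, j, n):
--     if i < j:
--         return _upto(i, j)
--     return _upto(i, n) + _upto(0, j)
-- ===== Notes on version B (the rewrite author's own statement) =====
-- stated objective: alternative
-- what changed: Replaces A's single stateful forward loop (counter, manual wrap reset, overclock flag) with segment construction back-to-front: each segment is generated descending from its upper endpoint and reversed, and the pre-wrap segment [i,n) is concatenated with the post-wrap segment [0,j).
-- outside the precondition, e.g. on get_clockwise_routes(5, 2, 4): A returns [5, 0, 1], B returns [0, 1]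
import Mathlib
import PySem

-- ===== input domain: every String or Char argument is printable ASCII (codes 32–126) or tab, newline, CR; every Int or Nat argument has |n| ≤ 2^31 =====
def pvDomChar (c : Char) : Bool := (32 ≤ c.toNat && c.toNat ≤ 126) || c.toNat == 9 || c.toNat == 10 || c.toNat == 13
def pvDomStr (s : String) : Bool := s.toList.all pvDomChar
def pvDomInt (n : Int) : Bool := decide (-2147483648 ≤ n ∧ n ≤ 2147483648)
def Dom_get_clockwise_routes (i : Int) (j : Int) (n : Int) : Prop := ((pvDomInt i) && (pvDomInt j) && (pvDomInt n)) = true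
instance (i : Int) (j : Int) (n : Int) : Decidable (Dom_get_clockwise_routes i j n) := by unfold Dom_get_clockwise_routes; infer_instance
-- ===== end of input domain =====

-- B replaces A's stateful wrap loop (counter + overclock flag + manual reset) with a
-- back-to-front construction: each segment is generated descending from its upper
-- endpoint and reversed, and the pre-wrap and post-wrap segments are concatenated.


-- ===== PORT A =====
-- the 'while k < j' loop of the i < j branch
def gcrLoop1 (j : Int) (k : Int) : List Int :=
  if k < j then k :: gcrLoop1 j (k + 1) else []
termination_by (j - k).toNat
decreasing_by omega

-- the 'while k < j or not overclock' loop of the else branch; Python may loop forever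
-- here (e.g. n ≤ j ≤ i), so it is ported with fuel that suffices on all of Pre_
def gcrLoop2 (j : Int) (n : Int) : Nat → Int → Bool → List Int
  | 0, _, _ => []
  | fuel + 1, k, oc =>
    if k < j ∨ oc = false then
      let k' := k + 1
      if k' > n - 1 then k :: gcrLoop2 j n fuel 0 true
      else k :: gcrLoop2 j n fuel k' oc
    else []

def get_clockwise_routes (i : Int) (j : Int) (n : Int) : List Int :=
  if i < j then gcrLoop1 j i
  else gcrLoop2 j n ((n - i).toNat + j.toNat + 2) i false

-- ===== PORT B =====
-- _upto's while loop: the descending list [b-1, b-2, …, a]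
def gcrDown (a k : Int) : List Int :=
  if k > a then (k - 1) :: gcrDown a (k - 1) else []
termination_by (k - a).toNat
decreasing_by omega

-- _upto: indices a..b-1, generated descending then reversed
def gcrUpto (a b : Int) : List Int := (gcrDown a b).reverse

def get_clockwise_routes_alt (i : Int) (j : Int) (n : Int) : List Int :=
  if i < j then gcrUpto i j
  else gcrUpto i n ++ gcrUpto 0 j

-- ===== PRECONDITION & SPEC =====
-- Pre_ excludes wrap-branch starts outside the ring (j ≤ i with n ≤ i), where A's value
-- [i] ++ range(0,j) (or, for n ≤ j, non-termination) is an accident of its reset logic.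
def Pre_get_clockwise_routes (i : Int) (j : Int) (n : Int) : Prop := i < j ∨ (j ≤ i ∧ i < n)
instance (i : Int) (j : Int) (n : Int) : Decidable (Pre_get_clockwise_routes i j n) := by unfold Pre_get_clockwise_routes; infer_instance
def pvWitness_get_clockwise_routes : Int × Int × Int := (3, 1, 5)

def Spec_get_clockwise_routes (i : Int) (j : Int) (n : Int) (out : List Int) : Prop := out = get_clockwise_routes_alt i j n
instance (i : Int) (j : Int) (n : Int) (out : List Int) : Decidable (Spec_get_clockwise_routes i j n out) := by unfold Spec_get_clockwise_routes; infer_instance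

-- ===== CLAIM (what is proved, stated in full; the proofs are below) =====
def Claim_equal_get_clockwise_routes : Prop := ∀ (i : Int) (j : Int) (n : Int), Dom_get_clockwise_routes i j n → Pre_get_clockwise_routes i j n → Spec_get_clockwise_routes i j n (get_clockwise_routes i j n)

-- ===== LEMMAS AND PROOFS =====

-- B's descending generator is range(a, b) reversed
theorem gcrDown_eq (a : Int) : ∀ b : Int, gcrDown a b = (PySem.List.pyRange a b 1).reverse := by
  intro b
  induction hm : (b - a).toNat using Nat.strong_induction_on generalizing b with
  | _ m ih =>
    rw [gcrDown]
    by_cases h : b > a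
    · rw [if_pos h, ih ((b - 1 - a).toNat) (by omega) (b - 1) rfl,
        PySem.List.pyRange_one, PySem.List.pyRange_one,
        show (b - a).toNat = (b - 1 - a).toNat + 1 by omega, List.range_succ]
      simp
      omega
    · rw [if_neg h, eq_comm]
      simp [PySem.List.pyRange_one, show (b - a).toNat = 0 by omega]

-- hence _upto is range(a, b)
theorem gcrUpto_eq (a b : Int) : gcrUpto a b = PySem.List.pyRange a b 1 := by
  rw [gcrUpto, gcrDown_eq, List.reverse_reverse]

-- the simple counting loop is range(k, j)
theorem gcrLoop1_eq (j : Int) : ∀ k : Int, gcrLoop1 j k = PySem.List.pyRange k j 1 := by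
  intro k
  induction hk : (j - k).toNat using Nat.strong_induction_on generalizing k with
  | _ m ih =>
    rw [gcrLoop1]
    by_cases h : k < j
    · rw [if_pos h, PySem.List.pyRange_one_cons h, ih ((j - (k+1)).toNat) (by omega) (k+1) rfl]
    · rw [if_neg h, eq_comm]
      simp [PySem.List.pyRange_one, show (j - k).toNat = 0 by omega]

-- after the wrap (overclock = true) the loop counts k up to j, never resetting again
theorem gcrLoop2_wrapped (j n : Int) (hj : j ≤ n - 1) :
    ∀ (fuel : Nat) (k : Int), (j - k).toNat ≤ fuel →
      gcrLoop2 j n fuel k true = PySem.List.pyRange k j 1 := by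
  intro fuel
  induction fuel with
  | zero =>
    intro k h
    rw [eq_comm]
    simp [gcrLoop2, PySem.List.pyRange_one, show (j - k).toNat = 0 by omega]
  | succ f ih =>
    intro k h
    rw [gcrLoop2]
    by_cases hk : k < j
    · rw [if_pos (Or.inl hk), if_neg (by omega), ih (k+1) (by omega),
        PySem.List.pyRange_one_cons hk]
    · rw [if_neg (by simp [hk]), eq_comm]
      simp [PySem.List.pyRange_one, show (j - k).toNat = 0 by omega]

-- before the wrap the loop counts k up to n - 1, resets, then counts 0 up to j
theorem gcrLoop2_climb (j n : Int) (hj : j < n) :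
    ∀ (m : Nat) (fuel : Nat) (k : Int), (n - k).toNat = m → k < n →
      (n - k).toNat + j.toNat ≤ fuel →
      gcrLoop2 j n fuel k false = PySem.List.pyRange k n 1 ++ PySem.List.pyRange 0 j 1 := by
  intro m
  induction m using Nat.strong_induction_on with
  | _ m ih =>
    intro fuel k hm hk hfuel
    obtain ⟨f, rfl⟩ : ∃ f, fuel = f + 1 := ⟨fuel - 1, by omega⟩
    rw [gcrLoop2, if_pos (Or.inr rfl)]
    by_cases hlast : k + 1 > n - 1
    · have hk' : k = n - 1 := by omega
      rw [if_pos hlast, gcrLoop2_wrapped j n (by omega) f 0 (by omega),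
        PySem.List.pyRange_one_cons hk, eq_comm]
      have : ¬ ((k : Int) + 1 < n) := by omega
      simp [PySem.List.pyRange_one, show (n - (k+1)).toNat = 0 by omega]
    · rw [if_neg hlast,
        ih ((n - (k+1)).toNat) (by omega) f (k+1) rfl (by omega) (by omega),
        PySem.List.pyRange_one_cons hk]
      simp

-- ===== VERDICT (by name: the statement is the Claim_ definition above) =====
theorem get_clockwise_routes_spec : Claim_equal_get_clockwise_routes := by
  intro i j n _ hpre
  unfold Spec_get_clockwise_routes get_clockwise_routes get_clockwise_routes_alt
  by_cases hij : i < j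
  · rw [if_pos hij, if_pos hij, gcrLoop1_eq, gcrUpto_eq]
  · rw [if_neg hij, if_neg hij, gcrUpto_eq, gcrUpto_eq]
    have hin : i < n := by
      rcases hpre with h | ⟨_, h⟩
      · exact absurd h hij
      · exact h
    exact gcrLoop2_climb j n (by omega) ((n - i).toNat)
      ((n - i).toNat + j.toNat + 2) i rfl hin (by omega)
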